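-- pv_equiv track=rewrite | github.com/FelipeJackFox/minegpt | scraper/explore_subgroups.py | _bucket_april_fools
-- ===== SOURCE A (Python) =====
-- def _bucket_april_fools(t: str, cats: list[str], text: str) -> str:
--     s = set(cats)
--     # Most specific Joke_* cat wins
--     for cat in ["Joke_blocks", "Joke_items", "Joke_mobs", "Joke_entities",
--                 "Joke_biomes", "Joke_effects", "Joke_dimensions",
--                 "Joke_features", "April_Fools'", "April_Fools"]:
--         if cat in s:
--             return cat
--     return "April_Fools_other"
-- ===== SOURCE B (Python) =====
-- PRIOS = ["Joke_blocks", "Joke_items", "Joke_mobs", "Joke_entities",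
--          "Joke_biomes", "Joke_effects", "Joke_dimensions",
--          "Joke_features", "April_Fools'", "April_Fools"]
-- RANK = {c: i for i, c in enumerate(PRIOS)}
--
-- def _bucket_april_fools(t: str, cats: list[str], text: str) -> str:
--     # One pass over cats keeping the best (smallest) priority rank seen.
--     best = None
--     for c in cats:
--         r = RANK.get(c)
--         if r is not None and (best is None or r < best):
--             best = r
--     return PRIOS[best] if best is not None else "April_Fools_other"
-- ===== Notes on version B (the rewrite author's own statement) =====
-- stated objective: alternative
-- what changed: Instead of scanning the fixed priority list and testing each entry against set(cats), B builds a rank dictionary once and makes one pass over cats keeping the smallest rank seen, recovering the category name from the priority list at the end.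
import Mathlib
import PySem

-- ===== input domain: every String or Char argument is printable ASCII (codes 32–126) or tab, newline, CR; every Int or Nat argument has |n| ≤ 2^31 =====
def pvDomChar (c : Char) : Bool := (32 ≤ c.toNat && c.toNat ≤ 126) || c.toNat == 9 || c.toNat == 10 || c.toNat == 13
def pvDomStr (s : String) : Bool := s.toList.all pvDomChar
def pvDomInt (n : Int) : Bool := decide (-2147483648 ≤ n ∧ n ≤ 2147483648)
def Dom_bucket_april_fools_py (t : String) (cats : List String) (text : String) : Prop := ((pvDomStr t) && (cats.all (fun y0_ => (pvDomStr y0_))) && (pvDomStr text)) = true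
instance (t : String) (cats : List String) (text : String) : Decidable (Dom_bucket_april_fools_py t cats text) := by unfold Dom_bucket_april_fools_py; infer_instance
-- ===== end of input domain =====

-- B replaces A's scan of the fixed priority list (membership test per entry) by a rank
-- dictionary and ONE pass over cats keeping the smallest rank seen; same return value.

-- ===== PORT A =====
-- the for-loop over the literal priority list: return the first cat contained in s
def pvAfLoop (s : PySem.Set String) : List String → String
  | [] => "April_Fools_other"
  | cat :: rest => if PySem.Set.contains s cat then cat else pvAfLoop s rest

def bucket_april_fools_py (t : String) (cats : List String) (text : String) : String :=
  pvAfLoop (PySem.Set.ofList cats)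
    ["Joke_blocks", "Joke_items", "Joke_mobs", "Joke_entities",
     "Joke_biomes", "Joke_effects", "Joke_dimensions",
     "Joke_features", "April_Fools'", "April_Fools"]

-- ===== PORT B =====
def pvPrios : List String :=
  ["Joke_blocks", "Joke_items", "Joke_mobs", "Joke_entities",
   "Joke_biomes", "Joke_effects", "Joke_dimensions",
   "Joke_features", "April_Fools'", "April_Fools"]

-- RANK = {c: i for i, c in enumerate(PRIOS)}
def pvRank : PySem.Dict String Int :=
  (PySem.List.enumerate pvPrios 0).foldl (fun d p => d.insert p.2 p.1) PySem.Dict.empty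

-- loop body: r = RANK.get(c); if r is not None and (best is None or r < best): best = r
def pvStep (best : Option Int) (c : String) : Option Int :=
  match pvRank.get? c, best with
  | none, best => best
  | some r, none => some r
  | some r, some m => if r < m then some r else some m

def bucket_april_fools_py_alt (t : String) (cats : List String) (text : String) : String :=
  match cats.foldl pvStep none with
  | some i => PySem.List.pyGetD pvPrios i "April_Fools_other"  -- PRIOS[best]; rank values are always in range, the default is unreachable
  | none => "April_Fools_other"

-- ===== PRECONDITION & SPEC =====
def Spec_bucket_april_fools_py (t : String) (cats : List String) (text : String) (out : String) : Prop := out = bucket_april_fools_py_alt t cats text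
instance (t : String) (cats : List String) (text : String) (out : String) : Decidable (Spec_bucket_april_fools_py t cats text out) := by unfold Spec_bucket_april_fools_py; infer_instance

-- ===== CLAIM (what is proved, stated in full; the proofs are below) =====
def Claim_equal_bucket_april_fools_py : Prop := ∀ (t : String) (cats : List String) (text : String), Dom_bucket_april_fools_py t cats text → Spec_bucket_april_fools_py t cats text (bucket_april_fools_py t cats text)

-- ===== LEMMAS AND PROOFS =====

-- value of a RANK lookup, as an if-chain over the ten priority strings
theorem pvRank_get? (c : String) : pvRank.get? c =
    if c = "Joke_blocks" then some 0 else if c = "Joke_items" then some 1 else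
    if c = "Joke_mobs" then some 2 else if c = "Joke_entities" then some 3 else
    if c = "Joke_biomes" then some 4 else if c = "Joke_effects" then some 5 else
    if c = "Joke_dimensions" then some 6 else if c = "Joke_features" then some 7 else
    if c = "April_Fools'" then some 8 else if c = "April_Fools" then some 9 else none := by
  simp [pvRank, pvPrios, PySem.List.enumerate, PySem.Dict.get?, PySem.Dict.insert,
    PySem.Dict.empty, List.find?, beq_iff_eq]
  split_ifs with h1 h2 h3 h4 h5 h6 h7 h8 h9 h10 <;> simp_all [eq_comm]
  simp only [beq_eq_false_iff_ne.mpr (fun e => h1 e.symm), beq_eq_false_iff_ne.mpr (fun e => h2 e.symm),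
    beq_eq_false_iff_ne.mpr (fun e => h3 e.symm), beq_eq_false_iff_ne.mpr (fun e => h4 e.symm),
    beq_eq_false_iff_ne.mpr (fun e => h5 e.symm), beq_eq_false_iff_ne.mpr (fun e => h6 e.symm),
    beq_eq_false_iff_ne.mpr (fun e => h7 e.symm), beq_eq_false_iff_ne.mpr (fun e => h8 e.symm),
    beq_eq_false_iff_ne.mpr (fun e => h9 e.symm), beq_eq_false_iff_ne.mpr (fun e => h10 e.symm)]

-- the minimum rank present in cats, as the same if-chain A's loop produces
def pvChain (cats : List String) : Option Int :=
  if "Joke_blocks" ∈ cats then some 0 else if "Joke_items" ∈ cats then some 1 else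
  if "Joke_mobs" ∈ cats then some 2 else if "Joke_entities" ∈ cats then some 3 else
  if "Joke_biomes" ∈ cats then some 4 else if "Joke_effects" ∈ cats then some 5 else
  if "Joke_dimensions" ∈ cats then some 6 else if "Joke_features" ∈ cats then some 7 else
  if "April_Fools'" ∈ cats then some 8 else if "April_Fools" ∈ cats then some 9 else none

def pvOmin (a b : Option Int) : Option Int :=
  match a, b with
  | none, b => b
  | some x, none => some x
  | some x, some y => some (min x y)

theorem pvStep_eq (best : Option Int) (c : String) : pvStep best c = pvOmin best (pvRank.get? c) := by
  unfold pvStep pvOmin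
  cases pvRank.get? c <;> cases best <;> simp [min_def] <;> split_ifs <;> first | rfl | omega

theorem pvOmin_assoc (a b c : Option Int) : pvOmin (pvOmin a b) c = pvOmin a (pvOmin b c) := by
  cases a <;> cases b <;> cases c <;> simp [pvOmin, min_assoc]

theorem pvChainCons0 (cs : List String) :
    pvOmin (some 0) (pvChain cs) = pvChain ("Joke_blocks" :: cs) := by
  simp only [pvChain, List.mem_cons, String.reduceEq, false_or, true_or, if_true]
  split_ifs <;> simp [pvOmin]

theorem pvChainCons1 (cs : List String) :
    pvOmin (some 1) (pvChain cs) = pvChain ("Joke_items" :: cs) := by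
  simp only [pvChain, List.mem_cons, String.reduceEq, false_or, true_or, if_true]
  split_ifs <;> simp [pvOmin]

theorem pvChainCons2 (cs : List String) :
    pvOmin (some 2) (pvChain cs) = pvChain ("Joke_mobs" :: cs) := by
  simp only [pvChain, List.mem_cons, String.reduceEq, false_or, true_or, if_true]
  split_ifs <;> simp [pvOmin]

theorem pvChainCons3 (cs : List String) :
    pvOmin (some 3) (pvChain cs) = pvChain ("Joke_entities" :: cs) := by
  simp only [pvChain, List.mem_cons, String.reduceEq, false_or, true_or, if_true]
  split_ifs <;> simp [pvOmin]

theorem pvChainCons4 (cs : List String) :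
    pvOmin (some 4) (pvChain cs) = pvChain ("Joke_biomes" :: cs) := by
  simp only [pvChain, List.mem_cons, String.reduceEq, false_or, true_or, if_true]
  split_ifs <;> simp [pvOmin]

theorem pvChainCons5 (cs : List String) :
    pvOmin (some 5) (pvChain cs) = pvChain ("Joke_effects" :: cs) := by
  simp only [pvChain, List.mem_cons, String.reduceEq, false_or, true_or, if_true]
  split_ifs <;> simp [pvOmin]

theorem pvChainCons6 (cs : List String) :
    pvOmin (some 6) (pvChain cs) = pvChain ("Joke_dimensions" :: cs) := by
  simp only [pvChain, List.mem_cons, String.reduceEq, false_or, true_or, if_true]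
  split_ifs <;> simp [pvOmin]

theorem pvChainCons7 (cs : List String) :
    pvOmin (some 7) (pvChain cs) = pvChain ("Joke_features" :: cs) := by
  simp only [pvChain, List.mem_cons, String.reduceEq, false_or, true_or, if_true]
  split_ifs <;> simp [pvOmin]

theorem pvChainCons8 (cs : List String) :
    pvOmin (some 8) (pvChain cs) = pvChain ("April_Fools'" :: cs) := by
  simp only [pvChain, List.mem_cons, String.reduceEq, false_or, true_or, if_true]
  split_ifs <;> simp [pvOmin]

theorem pvChainCons9 (cs : List String) :
    pvOmin (some 9) (pvChain cs) = pvChain ("April_Fools" :: cs) := by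
  simp only [pvChain, List.mem_cons, String.reduceEq, false_or, true_or, if_true]
  split_ifs <;> simp [pvOmin]

theorem pvChainConsNone (c : String) (cs : List String) (h1 : ¬ c = "Joke_blocks")
    (h2 : ¬ c = "Joke_items") (h3 : ¬ c = "Joke_mobs") (h4 : ¬ c = "Joke_entities")
    (h5 : ¬ c = "Joke_biomes") (h6 : ¬ c = "Joke_effects") (h7 : ¬ c = "Joke_dimensions")
    (h8 : ¬ c = "Joke_features") (h9 : ¬ c = "April_Fools'") (h10 : ¬ c = "April_Fools") :
    pvChain cs = pvChain (c :: cs) := by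
  simp only [pvChain, List.mem_cons,
    or_iff_right (show ¬("Joke_blocks" = c) from fun e => h1 e.symm),
    or_iff_right (show ¬("Joke_items" = c) from fun e => h2 e.symm),
    or_iff_right (show ¬("Joke_mobs" = c) from fun e => h3 e.symm),
    or_iff_right (show ¬("Joke_entities" = c) from fun e => h4 e.symm),
    or_iff_right (show ¬("Joke_biomes" = c) from fun e => h5 e.symm),
    or_iff_right (show ¬("Joke_effects" = c) from fun e => h6 e.symm),
    or_iff_right (show ¬("Joke_dimensions" = c) from fun e => h7 e.symm),
    or_iff_right (show ¬("Joke_features" = c) from fun e => h8 e.symm),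
    or_iff_right (show ¬("April_Fools'" = c) from fun e => h9 e.symm),
    or_iff_right (show ¬("April_Fools" = c) from fun e => h10 e.symm)]

theorem pvChain_cons (c : String) (cs : List String) :
    pvOmin (pvRank.get? c) (pvChain cs) = pvChain (c :: cs) := by
  rw [pvRank_get?]
  split_ifs with h1 h2 h3 h4 h5 h6 h7 h8 h9 h10
  · subst h1
    exact pvChainCons0 cs
  · subst h2
    exact pvChainCons1 cs
  · subst h3
    exact pvChainCons2 cs
  · subst h4
    exact pvChainCons3 cs
  · subst h5
    exact pvChainCons4 cs
  · subst h6
    exact pvChainCons5 cs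
  · subst h7
    exact pvChainCons6 cs
  · subst h8
    exact pvChainCons7 cs
  · subst h9
    exact pvChainCons8 cs
  · subst h10
    exact pvChainCons9 cs
  · exact pvChainConsNone c cs h1 h2 h3 h4 h5 h6 h7 h8 h9 h10

theorem pvFold_chain (cats : List String) (acc : Option Int) :
    cats.foldl pvStep acc = pvOmin acc (pvChain cats) := by
  induction cats generalizing acc with
  | nil => cases acc <;> simp [pvChain, pvOmin]
  | cons c cs ih =>
    simp only [List.foldl_cons, ih, pvStep_eq, pvOmin_assoc, pvChain_cons]

-- ===== VERDICT (by name: the statement is the Claim_ definition above) =====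
set_option maxHeartbeats 1000000 in
theorem bucket_april_fools_py_spec : Claim_equal_bucket_april_fools_py := by
  intro t cats text _
  show _ = _
  rw [bucket_april_fools_py_alt, pvFold_chain]
  show bucket_april_fools_py t cats text = (match pvOmin none (pvChain cats) with
    | some i => PySem.List.pyGetD pvPrios i "April_Fools_other"
    | none => "April_Fools_other")
  have : pvOmin none (pvChain cats) = pvChain cats := rfl
  rw [this]
  simp only [bucket_april_fools_py, pvAfLoop, PySem.Set.contains_eq_decide,
    PySem.Set.mem_ofList, decide_eq_true_eq, pvChain]
  split_ifs <;> rfl
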